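-- pv_equiv track=rewrite | github.com/JakeSpitznagel/dnd_utils | import_script.py | format_spell_text
-- ===== SOURCE A (Python) =====
-- def format_spell_text(txt):
--     out = txt
--     newline_runs = []
--     if '\n' in out:
--         on_run = False
--         for char in out:
--             if on_run and char == '\n':
--                 newline_runs[-1] += 1
--             elif char == '\n':
--                 newline_runs.append(1)
--                 on_run = True
--             else:
--                 on_run = False
--
--     newline_runs = list(set(newline_runs))
--     newline_runs.sort(reverse=True)
--
--     for i in newline_runs:
--         if i == 1:
--             break
--         out = out.replace(''.join(['\n' for _ in range(i)]), '')
--     out = out.replace('.', '.\n').replace('\n', '\n    ')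
--     out = out.rstrip()
--     return out
-- ===== SOURCE B (Python) =====
-- # B: one groupby pass drops every run of >=2 newlines, instead of counting run
-- # lengths, sorting them and doing one global replace per distinct length.
-- from itertools import groupby
--
--
-- def format_spell_text(txt):
--     parts = []
--     for ch, grp in groupby(txt):
--         run = ''.join(grp)
--         if ch != '\n' or len(run) == 1:
--             parts.append(run)
--     out = ''.join(parts)
--     out = out.replace('.', '.\n').replace('\n', '\n    ')
--     out = out.rstrip()
--     return out
-- ===== Notes on version B (the rewrite author's own statement) =====
-- stated objective: simpler
-- what changed: A counts all maximal newline-run lengths, dedupes and sorts them descending, and performs one global str.replace per distinct length; B does a single itertools.groupby pass that keeps every group except newline runs of length >= 2, then applies the identical tail transforms.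
import Mathlib
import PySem

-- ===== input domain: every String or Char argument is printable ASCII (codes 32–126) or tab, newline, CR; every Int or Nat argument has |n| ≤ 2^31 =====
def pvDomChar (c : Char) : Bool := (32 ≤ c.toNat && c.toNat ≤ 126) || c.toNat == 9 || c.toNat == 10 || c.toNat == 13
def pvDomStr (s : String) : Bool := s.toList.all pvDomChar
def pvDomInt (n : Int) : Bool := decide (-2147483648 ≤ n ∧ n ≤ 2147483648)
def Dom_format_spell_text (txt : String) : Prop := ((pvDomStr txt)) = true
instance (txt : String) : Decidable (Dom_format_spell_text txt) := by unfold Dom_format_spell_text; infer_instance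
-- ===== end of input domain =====

-- B replaces A's first phase (count maximal newline-run lengths, dedupe+sort them,
-- one global str.replace per distinct length) by a single group-by-runs pass that
-- drops every run of >= 2 newlines; the tail transforms are unchanged (objective: simpler).

-- ===== PORT A =====
-- `newline_runs[-1] += 1` (only reached with the list nonempty)
def pvIncLast : List Int → List Int
  | [] => []
  | [x] => [x + 1]
  | x :: xs => x :: pvIncLast xs

-- state: (on_run, newline_runs)
def pvStepA (st : Bool × List Int) (c : Char) : Bool × List Int :=
  if st.1 = true ∧ c = '\n' then (st.1, pvIncLast st.2)
  else if c = '\n' then (true, st.2 ++ [(1 : Int)])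
  else (false, st.2)

-- ''.join(['\n' for _ in range(i)])
def pvNlJoin (i : Int) : String :=
  PySem.Str.join "" ((PySem.List.pyRange 0 i 1).map (fun _ => "\n"))

-- for i in newline_runs: if i == 1: break; out = out.replace('\n'*i, '')
def pvLoopA : List Int → String → String
  | [], s => s
  | i :: r, s => if i = 1 then s else pvLoopA r (PySem.Str.replace s (pvNlJoin i) "")

def format_spell_text (txt : String) : String :=
  let out := txt
  let newline_runs : List Int :=
    if PySem.Str.isIn "\n" out then
      (out.toList.foldl pvStepA (false, [])).2
    else []
  let newline_runs := PySem.List.sorted (PySem.Set.ofList newline_runs) (fun x => x) true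
  let out := pvLoopA newline_runs out
  let out := PySem.Str.replace (PySem.Str.replace out "." ".\n") "\n" "\n    "
  PySem.Str.rstrip out

-- ===== PORT B =====
-- itertools.groupby(txt): maximal runs of equal adjacent characters
def pvGroups : List Char → List (List Char)
  | [] => []
  | c :: t =>
    match pvGroups t with
    | (d :: g) :: r => if c = d then (c :: d :: g) :: r else [c] :: (d :: g) :: r
    | r => [c] :: r

def format_spell_text_alt (txt : String) : String :=
  let parts := (pvGroups txt.toList).foldl
    (fun (parts : List (List Char)) run =>
      if ¬ run.head? = some '\n' ∨ run.length = 1 then parts ++ [run] else parts) []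
  let out := String.ofList (PySem.Chars.join [] parts)
  let out := PySem.Str.replace (PySem.Str.replace out "." ".\n") "\n" "\n    "
  PySem.Str.rstrip out

-- ===== PRECONDITION & SPEC =====
def Spec_format_spell_text (txt : String) (out : String) : Prop := out = format_spell_text_alt txt
instance (txt : String) (out : String) : Decidable (Spec_format_spell_text txt out) := by unfold Spec_format_spell_text; infer_instance

-- ===== CLAIM (what is proved, stated in full; the proofs are below) =====
def Claim_equal_format_spell_text : Prop := ∀ (txt : String), Dom_format_spell_text txt → Spec_format_spell_text txt (format_spell_text txt)

-- ===== LEMMAS AND PROOFS =====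

-- token view of a string: newline-free chunks and maximal newline runs
inductive PvTok
  | chs (cs : List Char)
  | run (n : Nat)
deriving DecidableEq

def pvNl (n : Nat) : List Char := List.replicate n '\n'

def pvRender : List PvTok → List Char
  | [] => []
  | PvTok.chs cs :: r => cs ++ pvRender r
  | PvTok.run n :: r => pvNl n ++ pvRender r

def pvHeadNotRun : List PvTok → Prop
  | PvTok.run _ :: _ => False
  | _ => True

def pvWf : List PvTok → Prop
  | [] => True
  | PvTok.chs cs :: r => cs ≠ [] ∧ (∀ c ∈ cs, c ≠ '\n') ∧ pvWf r
  | PvTok.run n :: r => 1 ≤ n ∧ pvHeadNotRun r ∧ pvWf r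

def pvKeep : PvTok → Bool
  | PvTok.chs _ => true
  | PvTok.run n => decide (n = 1)

-- reference deletion: what Chars.replace s ('\n'*k) '' computes, k ≥ 1
def pvRepl (k : Nat) (l : List Char) : List Char :=
  if _h : (pvNl k).isPrefixOf l ∧ k ≠ 0 then pvRepl k (l.drop k)
  else
    match l with
    | [] => []
    | c :: t => c :: pvRepl k t
termination_by l.length
decreasing_by
  all_goals rcases l with _ | ⟨c, t⟩ <;>
    simp_all [pvNl, List.isPrefixOf_iff_prefix, List.length_drop] <;> omega

theorem pvNl_not_prefix (k m : Nat) (hm : m < k) (l : List Char)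
    (hl : ∀ c, l.head? = some c → c ≠ '\n') :
    ¬ (pvNl k).isPrefixOf (pvNl m ++ l) = true := by
  rw [List.isPrefixOf_iff_prefix]
  intro hp
  rcases l with _ | ⟨c0, t0⟩
  · have := hp.length_le
    simp [pvNl] at this
    omega
  · have hc0 : c0 ≠ '\n' := hl c0 rfl
    have hsplit : pvNl k = (pvNl m ++ ['\n']) ++ pvNl (k - (m + 1)) := by
      rw [show pvNl m ++ ['\n'] = pvNl (m + 1) from by simp [pvNl, List.replicate_succ']]
      simp only [pvNl, ← List.replicate_add]
      congr 1
      omega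
    rw [hsplit] at hp
    have hp2 : pvNl m ++ ['\n'] <+: pvNl m ++ c0 :: t0 :=
      (List.prefix_append _ _).trans hp
    rcases hp2 with ⟨u, hu⟩
    rw [List.append_assoc] at hu
    have h3 := List.append_cancel_left hu
    simp only [List.singleton_append, List.cons.injEq] at h3
    exact hc0 h3.1.symm

theorem pvRepl_nil (k : Nat) (hk : k ≠ 0) : pvRepl k [] = [] := by
  rw [pvRepl, dif_neg]
  rintro ⟨hp, -⟩
  rw [List.isPrefixOf_iff_prefix] at hp
  simp [pvNl] at hp
  omega

theorem pvRepl_cons_neg (k : Nat) (c : Char) (t : List Char)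
    (h : ¬ (pvNl k).isPrefixOf (c :: t) = true) : pvRepl k (c :: t) = c :: pvRepl k t := by
  rw [pvRepl, dif_neg]
  rintro ⟨hp, -⟩
  exact h hp

theorem pvRepl_pos (k : Nat) (hk : k ≠ 0) (l : List Char)
    (h : (pvNl k).isPrefixOf l = true) : pvRepl k l = pvRepl k (l.drop k) := by
  rw [pvRepl, dif_pos ⟨h, hk⟩]

theorem pvRepl_go (k : Nat) (hk : k ≠ 0) :
    ∀ fuel l acc, l.length ≤ fuel →
      PySem.Chars.replace.go (pvNl k) [] fuel l acc = acc.reverse ++ pvRepl k l := by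
  intro fuel
  induction fuel with
  | zero =>
    intro l acc hl
    have : l = [] := by
      cases l
      · rfl
      · simp at hl
    subst this
    rw [PySem.Chars.replace.go]
    simp [pvRepl_nil k hk]
  | succ fuel ih =>
    intro l acc hl
    rcases l with _ | ⟨c, t⟩
    · rw [PySem.Chars.replace.go]
      · simp [pvRepl_nil k hk]
      · omega
    · rw [PySem.Chars.replace.go]
      by_cases hp : (pvNl k).isPrefixOf (c :: t) = true
      · rw [if_pos hp]
        have hlen : (pvNl k).length = k := by simp [pvNl]
        rw [hlen]
        have hdrop : (List.drop k (c :: t)).length ≤ fuel := by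
          simp only [List.length_drop, List.length_cons]
          simp only [List.length_cons] at hl
          omega
        rw [ih _ _ hdrop]
        rw [← pvRepl_pos k hk _ hp]
        simp
      · rw [if_neg hp]
        rw [ih t (c :: acc) (by simp only [List.length_cons] at hl; omega)]
        rw [pvRepl_cons_neg k c t hp]
        simp

theorem pvReplace_eq_repl (k : Nat) (hk : k ≠ 0) (l : List Char) :
    PySem.Chars.replace l (pvNl k) [] = pvRepl k l := by
  rw [PySem.Chars.replace, if_neg (by simp [pvNl, hk])]
  rw [pvRepl_go k hk l.length l [] (le_refl _)]
  simp

theorem pvRepl_chs (k : Nat) (hk : 1 ≤ k) (cs l : List Char) (hcs : ∀ c ∈ cs, c ≠ '\n') :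
    pvRepl k (cs ++ l) = cs ++ pvRepl k l := by
  induction cs with
  | nil => simp
  | cons c cs ih =>
    have hnp : ¬ (pvNl k).isPrefixOf (c :: (cs ++ l)) = true := by
      have := pvNl_not_prefix k 0 (by omega) (c :: (cs ++ l))
        (fun c' hc' => by
          simp only [List.head?_cons, Option.some.injEq] at hc'
          rw [← hc']
          exact hcs c (by simp))
      simpa [pvNl] using this
    rw [List.cons_append, pvRepl_cons_neg k _ _ hnp, ih (fun c' hc' => hcs c' (by simp [hc']))]
    simp

theorem pvRepl_run_lt (k : Nat) (hk : 1 ≤ k) (l : List Char)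
    (hl : ∀ c, l.head? = some c → c ≠ '\n') :
    ∀ j, j < k → pvRepl k (pvNl j ++ l) = pvNl j ++ pvRepl k l := by
  intro j
  induction j with
  | zero => intro _; simp [pvNl]
  | succ j ih =>
    intro hj
    have hsplit : pvNl (j + 1) ++ l = '\n' :: (pvNl j ++ l) := by
      simp [pvNl, List.replicate_succ]
    have hnp : ¬ (pvNl k).isPrefixOf ('\n' :: (pvNl j ++ l)) = true := by
      have := pvNl_not_prefix k (j + 1) hj l hl
      rwa [hsplit] at this
    rw [hsplit, pvRepl_cons_neg k _ _ hnp, ih (by omega)]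
    simp [pvNl, List.replicate_succ]

theorem pvRepl_run_eq (k : Nat) (_hk : 1 ≤ k) (l : List Char) :
    pvRepl k (pvNl k ++ l) = pvRepl k l := by
  rw [pvRepl_pos k (by omega) _ (List.isPrefixOf_iff_prefix.mpr (List.prefix_append _ _))]
  congr 1
  rw [List.drop_left' (by simp [pvNl])]

theorem pvRender_head (r : List PvTok) (h1 : pvHeadNotRun r) (h2 : pvWf r) :
    ∀ c, (pvRender r).head? = some c → c ≠ '\n' := by
  rcases r with _ | ⟨t, r'⟩
  · intro c hc; simp [pvRender] at hc
  · rcases t with cs | n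
    · rcases h2 with ⟨hne, hmem, -⟩
      rcases cs with _ | ⟨c0, cs'⟩
      · exact absurd rfl hne
      · intro c hc
        simp only [pvRender, List.cons_append, List.head?_cons, Option.some.injEq] at hc
        rw [← hc]
        exact hmem c0 (by simp)
    · exact absurd h1 (by simp [pvHeadNotRun])

-- one replace pass deletes exactly the runs of length k
theorem pvRepl_render (k : Nat) (hk : 1 ≤ k) :
    ∀ toks, pvWf toks → (∀ n, PvTok.run n ∈ toks → n ≤ k) →
      pvRepl k (pvRender toks) = pvRender (toks.filter (· ≠ PvTok.run k)) := by
  intro toks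
  induction toks with
  | nil => intro _ _; simp [pvRender, pvRepl_nil k (by omega)]
  | cons t r ih =>
    intro hwf hle
    rcases t with cs | n
    · rcases hwf with ⟨hne, hmem, hwfr⟩
      rw [pvRender, pvRepl_chs k hk cs _ hmem,
        ih hwfr (fun n hn => hle n (by simp [hn]))]
      rw [List.filter_cons_of_pos (by simp)]
      rfl
    · rcases hwf with ⟨hn1, hhead, hwfr⟩
      have hheadc := pvRender_head r hhead hwfr
      by_cases hnk : n = k
      · rw [pvRender, hnk, pvRepl_run_eq k hk, ih hwfr (fun n hn => hle n (by simp [hn]))]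
        rw [List.filter_cons_of_neg (by simp)]
      · rw [pvRender, pvRepl_run_lt k hk _ hheadc n
          (lt_of_le_of_ne (hle n (by simp)) hnk),
          ih hwfr (fun n hn => hle n (by simp [hn]))]
        rw [List.filter_cons_of_pos (by simp [hnk])]
        rfl

theorem pvWf_filter (k : Nat) :
    ∀ toks, pvWf toks → pvWf (toks.filter (· ≠ PvTok.run k)) := by
  intro toks
  induction toks with
  | nil => intro _; trivial
  | cons t r ih =>
    intro hwf
    rcases t with cs | n
    · rcases hwf with ⟨hne, hmem, hwfr⟩
      rw [List.filter_cons_of_pos (by simp)]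
      exact ⟨hne, hmem, ih hwfr⟩
    · rcases hwf with ⟨hn1, hhead, hwfr⟩
      by_cases hnk : n = k
      · subst hnk
        rw [List.filter_cons_of_neg (by simp)]
        exact ih hwfr
      · rw [List.filter_cons_of_pos (by simp [hnk])]
        refine ⟨hn1, ?_, ih hwfr⟩
        rcases r with _ | ⟨t2, r2⟩
        · trivial
        · rcases t2 with cs2 | n2
          · rw [List.filter_cons_of_pos (by simp)]
            trivial
          · exact absurd hhead (by simp [pvHeadNotRun])

-- list-level version of A's replace loop
def pvLoopAL : List Int → List Char → List Char
  | [], s => s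
  | i :: r, s => if i = 1 then s else pvLoopAL r (PySem.Chars.replace s (pvNl i.toNat) [])

theorem pvJoin_eq_flatten (gs : List (List Char)) : PySem.Chars.join [] gs = gs.flatten := by
  induction gs with
  | nil => simp [PySem.Chars.join_nil]
  | cons g gs ih =>
    cases gs with
    | nil => simp [PySem.Chars.join_singleton]
    | cons h r =>
      rw [PySem.Chars.join_cons_cons]
      simp only [List.flatten_cons, List.append_nil]
      rw [ih]
      simp

theorem pvNlJoin_toList (i : Int) : (pvNlJoin i).toList = pvNl i.toNat := by
  rw [pvNlJoin, PySem.Str.toList_join, show ("".toList : List Char) = [] from rfl]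
  have : ∀ (lst : List Int), PySem.Chars.join []
      (List.map String.toList (lst.map (fun _ => "\n"))) = List.replicate lst.length '\n' := by
    intro lst
    rw [pvJoin_eq_flatten]
    induction lst with
    | nil => rfl
    | cons x xs ih => simpa [List.replicate_succ] using ih
  rw [this, PySem.List.length_pyRange_one]
  simp [pvNl]

theorem pvLoopA_toList (L : List Int) (s : String) :
    (pvLoopA L s).toList = pvLoopAL L s.toList := by
  induction L generalizing s with
  | nil => rfl
  | cons i r ih =>
    by_cases hi : i = 1
    · simp [pvLoopA, pvLoopAL, hi]
    · rw [pvLoopA, if_neg hi, pvLoopAL, if_neg hi, ih]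
      rw [PySem.Str.toList_replace, pvNlJoin_toList]
      rfl

theorem pvFilter_keep_self (toks : List PvTok) (h : ∀ t ∈ toks, pvKeep t = true) :
    pvRender toks = pvRender (toks.filter pvKeep) := by
  rw [List.filter_eq_self.mpr h]

theorem pvLoopAL_render :
    ∀ (L : List Int) toks, pvWf toks → L.Pairwise (· > ·) →
      (∀ n, PvTok.run n ∈ toks → (n : Int) ∈ L) → (∀ i ∈ L, 1 ≤ i) →
      pvLoopAL L (pvRender toks) = pvRender (toks.filter pvKeep) := by
  intro L
  induction L with
  | nil =>
    intro toks hwf _ hmem _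
    rw [pvLoopAL]
    apply pvFilter_keep_self
    intro t ht
    rcases t with cs | n
    · rfl
    · exact absurd (hmem n ht) (by simp)
  | cons i L' ih =>
    intro toks hwf hpw hmem hpos
    by_cases hi : i = 1
    · rw [pvLoopAL, if_pos hi]
      apply pvFilter_keep_self
      intro t ht
      rcases t with cs | n
      · rfl
      · have h1 := hmem n ht
        rcases List.mem_cons.mp h1 with h2 | h2
        · have : n = 1 := by rw [hi] at h2; omega
          simp [pvKeep, this]
        · have hlt := (List.pairwise_cons.mp hpw).1 _ h2
          have hge : 1 ≤ (n : Int) := hpos _ (List.mem_cons_of_mem _ h2)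
          rw [hi] at hlt
          omega
    · have hi2 : 2 ≤ i := by have := hpos i (by simp); omega
      set k := i.toNat with hk
      have hkval : (k : Int) = i := by omega
      have hk2 : 2 ≤ k := by omega
      rw [pvLoopAL, if_neg hi]
      rw [pvReplace_eq_repl k (by omega) _]
      rw [pvRepl_render k (by omega) toks hwf ?hbound]
      case hbound =>
        intro n hn
        have h1 := hmem n hn
        rcases List.mem_cons.mp h1 with h2 | h2
        · omega
        · have hlt := (List.pairwise_cons.mp hpw).1 _ h2
          omega
      rw [ih (toks.filter (· ≠ PvTok.run k)) (pvWf_filter k toks hwf)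
        (List.pairwise_cons.mp hpw).2 ?hmem' (fun j hj => hpos j (by simp [hj]))]
      case hmem' =>
        intro n hn
        rw [List.mem_filter] at hn
        have h1 := hmem n hn.1
        have h2 : n ≠ k := by
          intro hnk
          rw [hnk] at hn
          simp at hn
        rcases List.mem_cons.mp h1 with h3 | h3
        · exfalso; apply h2; omega
        · exact h3
      rw [List.filter_filter]
      congr 1
      apply List.filter_congr
      intro t _
      rcases t with cs | n
      · simp [pvKeep]
      · by_cases hn1 : n = 1
        · simp [pvKeep, hn1]
          omega
        · simp [pvKeep, hn1]

-- groups facts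
def pvGOK (g : List Char) : Prop := ∃ c n, 1 ≤ n ∧ g = List.replicate n c

def pvGwf : List (List Char) → Prop
  | [] => True
  | g :: r => pvGOK g ∧ (∀ g', r.head? = some g' → g'.head? ≠ g.head?) ∧ pvGwf r

theorem pvGwf_groups (s : List Char) : pvGwf (pvGroups s) := by
  induction s with
  | nil => simp [pvGroups, pvGwf]
  | cons c t ih =>
    rcases h : pvGroups t with _ | ⟨g, r⟩
    · rw [h] at ih
      simp only [pvGroups, h, pvGwf]
      refine ⟨⟨c, 1, le_refl 1, rfl⟩, by simp, trivial⟩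
    · rw [h] at ih
      rcases g with _ | ⟨d, g'⟩
      · rcases ih with ⟨⟨c0, n, hn, habs⟩, -, -⟩
        exfalso
        cases n with
        | zero => omega
        | succ n => simp [List.replicate] at habs
      · rcases ih with ⟨⟨c0, n, hn, hrep⟩, hdiff, hgwf⟩
        rcases n with _ | m
        · omega
        · rw [List.replicate_succ] at hrep
          rcases List.cons.injEq .. ▸ hrep with ⟨hd, hg'⟩
          subst hd
          by_cases hcd : c = d
          · subst hcd
            simp only [pvGroups, h]
            refine ⟨⟨c, m + 2, by omega, ?_⟩, ?_, hgwf⟩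
            · rw [List.replicate_succ, List.replicate_succ, ← hg']
            · intro g2 hg2
              have := hdiff g2 hg2
              simpa using this
          · simp only [pvGroups, h, if_neg hcd, pvGwf]
            refine ⟨⟨c, 1, le_refl 1, rfl⟩, ?_, ⟨d, m + 1, hn, hrep⟩, hdiff, hgwf⟩
            intro g2 hg2
            simp only [List.head?_cons, Option.some.injEq] at hg2 ⊢
            rw [← hg2]
            simp [Ne.symm hcd]

theorem pvFlatten_groups (s : List Char) : (pvGroups s).flatten = s := by
  induction s with
  | nil => simp [pvGroups]
  | cons c t ih =>
    rcases h : pvGroups t with _ | ⟨g, r⟩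
    · rw [h] at ih; simp at ih
      simp [pvGroups, ih]
    · rw [h] at ih
      rcases g with _ | ⟨d, g'⟩
      · simp only [pvGroups, h]
        simpa using ih
      · by_cases hcd : c = d
        · subst hcd
          simp only [pvGroups, h, List.flatten_cons] at ih ⊢
          simp at ih ⊢
          exact ih
        · simp only [pvGroups, h, if_neg hcd, List.flatten_cons] at ih ⊢
          simpa using ih

def pvTokOf (g : List Char) : PvTok :=
  if g.head? = some '\n' then PvTok.run g.length else PvTok.chs g

theorem pvWf_tokOf : ∀ gs, pvGwf gs → pvWf (gs.map pvTokOf) := by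
  intro gs
  induction gs with
  | nil => intro _; trivial
  | cons g r ih =>
    rintro ⟨⟨c, n, hn, hrep⟩, hdiff, hgwf⟩
    rcases n with _ | m
    · omega
    · have hhead : g.head? = some c := by rw [hrep, List.replicate_succ]; rfl
      by_cases hc : c = '\n'
      · have htok : pvTokOf g = PvTok.run g.length := by
          simp [pvTokOf, hhead, hc]
        simp only [List.map_cons, htok, pvWf]
        refine ⟨by rw [hrep]; simp, ?_, ih hgwf⟩
        rcases r with _ | ⟨g2, r2⟩
        · trivial
        · have h2 : g2.head? ≠ g.head? := hdiff g2 (by simp)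
          have : pvTokOf g2 = PvTok.chs g2 := by
            rw [pvTokOf, if_neg]
            rw [hhead, hc] at h2
            exact h2
          simp only [List.map_cons, this]
          trivial
      · have htok : pvTokOf g = PvTok.chs g := by
          rw [pvTokOf, if_neg]
          rw [hhead]
          simp [hc]
        simp only [List.map_cons, htok, pvWf]
        refine ⟨by rw [hrep]; simp, ?_, ih hgwf⟩
        intro x hx
        rw [hrep] at hx
        rcases List.eq_of_mem_replicate hx with rfl
        exact hc

theorem pvRender_tokOf : ∀ gs, (∀ g ∈ gs, pvGOK g) → pvRender (gs.map pvTokOf) = PySem.Chars.join [] gs := by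
  intro gs hok
  rw [pvJoin_eq_flatten]
  induction gs with
  | nil => rfl
  | cons g r ih =>
    rcases hok g (by simp) with ⟨c, n, hn, hrep⟩
    rcases n with _ | m
    · omega
    · have hhead : g.head? = some c := by rw [hrep, List.replicate_succ]; rfl
      have ih' := ih (fun g hg => hok g (by simp [hg]))
      by_cases hc : c = '\n'
      · have htok : pvTokOf g = PvTok.run g.length := by simp [pvTokOf, hhead, hc]
        simp only [List.map_cons, htok, pvRender, List.flatten_cons, pvNl]
        rw [ih', hrep, hc]
        simp
      · have htok : pvTokOf g = PvTok.chs g := by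
          rw [pvTokOf, if_neg]; rw [hhead]; simp [hc]
        simp only [List.map_cons, htok, pvRender, List.flatten_cons]
        rw [ih']

theorem pvFilter_tokOf : ∀ (gs : List (List Char)), (∀ g ∈ gs, pvGOK g) →
    (gs.map pvTokOf).filter pvKeep
      = (gs.filter (fun g => decide (¬ g.head? = some '\n' ∨ g.length = 1))).map pvTokOf := by
  intro gs hok
  induction gs with
  | nil => rfl
  | cons g r ih =>
    rcases hok g (by simp) with ⟨c, n, hn, hrep⟩
    have ih' := ih (fun g hg => hok g (by simp [hg]))
    rcases n with _ | m
    · omega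
    · have hhead : g.head? = some c := by rw [hrep, List.replicate_succ]; rfl
      by_cases hc : c = '\n'
      · have htok : pvTokOf g = PvTok.run g.length := by simp [pvTokOf, hhead, hc]
        simp only [List.map_cons, htok, List.filter_cons, hhead, hc, pvKeep]
        by_cases hlen : g.length = 1
        · simp [hlen, htok, ih']
        · simp [hlen, ih']
      · have htok : pvTokOf g = PvTok.chs g := by
          rw [pvTokOf, if_neg]; rw [hhead]; simp [hc]
        have hcond : (¬ g.head? = some '\n' ∨ g.length = 1) := by
          left; rw [hhead]; simp [hc]
        simp only [List.map_cons, List.filter_cons]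
        simp [pvKeep, htok, hcond, ih']

-- A's run-length loop
def pvRunsOf : List PvTok → List Int
  | [] => []
  | PvTok.run n :: r => (n : Int) :: pvRunsOf r
  | PvTok.chs _ :: r => pvRunsOf r

def pvRM : List Char → Option Int → List Int
  | [], none => []
  | [], some m => [m]
  | c :: t, none => if c = '\n' then pvRM t (some 1) else pvRM t none
  | c :: t, some m => if c = '\n' then pvRM t (some (m + 1)) else m :: pvRM t none

theorem pvIncLast_append (rs : List Int) (m : Int) : pvIncLast (rs ++ [m]) = rs ++ [m + 1] := by
  induction rs with
  | nil => rfl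
  | cons x xs ih =>
    rcases xs with _ | ⟨y, ys⟩
    · rfl
    · simp only [List.cons_append, pvIncLast] at ih ⊢
      rw [ih]

theorem pvFoldA (t : List Char) :
    (∀ rs, (List.foldl pvStepA (false, rs) t).2 = rs ++ pvRM t none) ∧
    (∀ rs m, (List.foldl pvStepA (true, rs ++ [m]) t).2 = rs ++ pvRM t (some m)) := by
  induction t with
  | nil => exact ⟨fun rs => by simp [pvRM], fun rs m => by simp [pvRM]⟩
  | cons c t ih =>
    constructor
    · intro rs
      by_cases hc : c = '\n'
      · have hstep : pvStepA (false, rs) c = (true, rs ++ [(1 : Int)]) := by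
          simp [pvStepA, hc]
        rw [List.foldl_cons, hstep, ih.2 rs 1]
        simp [pvRM, hc]
      · have hstep : pvStepA (false, rs) c = (false, rs) := by
          simp [pvStepA, hc]
        rw [List.foldl_cons, hstep, ih.1 rs]
        simp [pvRM, hc]
    · intro rs m
      by_cases hc : c = '\n'
      · have hstep : pvStepA (true, rs ++ [m]) c = (true, rs ++ [m + 1]) := by
          simp [pvStepA, hc, pvIncLast_append]
        rw [List.foldl_cons, hstep, ih.2 rs (m + 1)]
        simp [pvRM, hc]
      · have hstep : pvStepA (true, rs ++ [m]) c = (false, rs ++ [m]) := by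
          simp [pvStepA, hc]
        rw [List.foldl_cons, hstep, ih.1 (rs ++ [m])]
        simp [pvRM, hc]

def pvMerge (m : Int) : List (List Char) → List Int
  | [] => [m]
  | g :: r =>
    if g.head? = some '\n' then (m + (g.length : Int)) :: pvRunsOf (r.map pvTokOf)
    else m :: pvRunsOf ((g :: r).map pvTokOf)

theorem pvGroups_no_nil_head (t : List Char) (r : List (List Char))
    (h : pvGroups t = [] :: r) : False := by
  have := pvGwf_groups t
  rw [h] at this
  rcases this with ⟨⟨c0, n, hn, habs⟩, -, -⟩
  rcases n with _ | m
  · omega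
  · simp [List.replicate] at habs

theorem pvRunsOf_groups_cons_ne (c : Char) (t : List Char) (hc : c ≠ '\n') :
    pvRunsOf ((pvGroups (c :: t)).map pvTokOf) = pvRunsOf ((pvGroups t).map pvTokOf)
      ∧ ∃ g r, pvGroups (c :: t) = g :: r ∧ g.head? = some c := by
  have htok1 : pvTokOf [c] = PvTok.chs [c] := by rw [pvTokOf, if_neg (by simp [hc])]
  rcases h : pvGroups t with _ | ⟨g, r⟩
  · refine ⟨?_, [c], [], by simp [pvGroups, h], rfl⟩
    rw [show pvGroups (c :: t) = [[c]] from by simp [pvGroups, h]]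
    simp [htok1, pvRunsOf]
  · rcases g with _ | ⟨d, g'⟩
    · exact absurd h (fun h => pvGroups_no_nil_head t r h)
    · by_cases hcd : c = d
      · subst hcd
        have hgr : pvGroups (c :: t) = (c :: c :: g') :: r := by simp [pvGroups, h]
        have htok2 : pvTokOf (c :: c :: g') = PvTok.chs (c :: c :: g') := by
          rw [pvTokOf, if_neg (by simp [hc])]
        have htok3 : pvTokOf (c :: g') = PvTok.chs (c :: g') := by
          rw [pvTokOf, if_neg (by simp [hc])]
        refine ⟨?_, _, _, hgr, rfl⟩
        rw [hgr]
        simp only [List.map_cons, htok2, htok3]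
        simp [pvRunsOf]
      · have hgr : pvGroups (c :: t) = [c] :: (d :: g') :: r := by simp [pvGroups, h, hcd]
        refine ⟨?_, _, _, hgr, rfl⟩
        rw [hgr]
        simp only [List.map_cons, htok1]
        simp [pvRunsOf]

theorem pvRM_groups_all (s : List Char) :
    pvRM s none = pvRunsOf ((pvGroups s).map pvTokOf)
      ∧ ∀ m, pvRM s (some m) = pvMerge m (pvGroups s) := by
  induction s with
  | nil => exact ⟨rfl, fun m => rfl⟩
  | cons c t ih =>
    by_cases hc : c = '\n'
    · subst hc
      have hN : pvRM ('\n' :: t) none = pvRM t (some 1) := by simp [pvRM]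
      have hS : ∀ m, pvRM ('\n' :: t) (some m) = pvRM t (some (m + 1)) := by
        intro m; simp [pvRM]
      rcases h : pvGroups t with _ | ⟨g, r⟩
      · have hgr : pvGroups ('\n' :: t) = [['\n']] := by simp [pvGroups, h]
        have htok : pvTokOf ['\n'] = PvTok.run 1 := by simp [pvTokOf]
        constructor
        · rw [hN, ih.2 1, h, hgr]
          simp [pvMerge, htok, pvRunsOf]
        · intro m
          rw [hS m, ih.2 (m + 1), h, hgr]
          simp [pvMerge, pvRunsOf]
      · rcases g with _ | ⟨d, g'⟩
        · exact absurd h (fun h => pvGroups_no_nil_head t r h)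
        · by_cases hd : d = '\n'
          · subst hd
            have hgr : pvGroups ('\n' :: t) = ('\n' :: '\n' :: g') :: r := by
              simp [pvGroups, h]
            have htok : pvTokOf ('\n' :: '\n' :: g') = PvTok.run (g'.length + 2) := by
              simp [pvTokOf]
            constructor
            · rw [hN, ih.2 1, h, hgr]
              simp [pvMerge, htok, pvRunsOf]
              ring
            · intro m
              rw [hS m, ih.2 (m + 1), h, hgr]
              simp [pvMerge, htok, pvRunsOf]
              ring
          · have hne : ¬ ('\n' = d) := fun hh => hd hh.symm
            have hgr : pvGroups ('\n' :: t) = ['\n'] :: (d :: g') :: r := by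
              simp [pvGroups, h, hne]
            have htok : pvTokOf ['\n'] = PvTok.run 1 := by simp [pvTokOf]
            have htokd : pvTokOf (d :: g') = PvTok.chs (d :: g') := by
              rw [pvTokOf, if_neg (by simp [hd])]
            constructor
            · rw [hN, ih.2 1, h, hgr]
              simp [pvMerge, htok, htokd, pvRunsOf, hd]
            · intro m
              rw [hS m, ih.2 (m + 1), h, hgr]
              simp [pvMerge, htok, htokd, pvRunsOf, hd]
    · constructor
      · rw [show pvRM (c :: t) none = pvRM t none from by simp [pvRM, hc], ih.1]
        exact (pvRunsOf_groups_cons_ne c t hc).1.symm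
      · intro m
        rw [show pvRM (c :: t) (some m) = m :: pvRM t none from by simp [pvRM, hc], ih.1]
        rcases (pvRunsOf_groups_cons_ne c t hc) with ⟨heq, g, r, hgr, hghead⟩
        rw [hgr, pvMerge, if_neg (by rw [hghead]; simp [hc]), ← hgr, heq]

theorem pvRM_groups (s : List Char) :
    pvRM s none = pvRunsOf ((pvGroups s).map pvTokOf) := (pvRM_groups_all s).1

theorem pvRunsOf_pos : ∀ toks, pvWf toks → ∀ i ∈ pvRunsOf toks, 1 ≤ i := by
  intro toks
  induction toks with
  | nil => intro _ i hi; simp [pvRunsOf] at hi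
  | cons t r ih =>
    intro hwf i hi
    rcases t with cs | n
    · exact ih hwf.2.2 i hi
    · rcases List.mem_cons.mp (by simpa [pvRunsOf] using hi) with h | h
      · have := hwf.1; omega
      · exact ih hwf.2.2 i h

theorem pvMem_runsOf : ∀ (toks : List PvTok) (n : Nat), PvTok.run n ∈ toks → (n : Int) ∈ pvRunsOf toks := by
  intro toks n
  induction toks with
  | nil => intro h; simp at h
  | cons t r ih =>
    intro h
    rcases List.mem_cons.mp h with h1 | h1
    · rw [← h1, pvRunsOf]; simp
    · rcases t with cs | m
      · simp [pvRunsOf] at ih ⊢; exact ih h1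
      · simp [pvRunsOf, ih h1]

theorem pvNoNl_runsOf : ∀ toks, pvWf toks → '\n' ∉ pvRender toks → pvRunsOf toks = [] := by
  intro toks
  induction toks with
  | nil => intro _ _; rfl
  | cons t r ih =>
    intro hwf hno
    rcases t with cs | n
    · rw [pvRunsOf]
      exact ih hwf.2.2 (fun hc => hno (by simp [pvRender, hc]))
    · exfalso
      apply hno
      have : (1 : Nat) ≤ n := hwf.1
      rcases n with _ | m
      · omega
      · simp [pvRender, pvNl, List.replicate_succ]

theorem pvGwf_gok : ∀ gs, pvGwf gs → ∀ g ∈ gs, pvGOK g := by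
  intro gs
  induction gs with
  | nil => intro _ g hg; simp at hg
  | cons g0 r ih =>
    rintro ⟨hok, -, hgwf⟩ g hg
    rcases List.mem_cons.mp hg with h | h
    · rw [h]; exact hok
    · exact ih hgwf g h

-- ===== VERDICT (by name: the statement is the Claim_ definition above) =====
theorem format_spell_text_spec : Claim_equal_format_spell_text := by
  intro txt _
  unfold Spec_format_spell_text
  have hgwf := pvGwf_groups txt.toList
  have hgok := pvGwf_gok _ hgwf
  have hwf := pvWf_tokOf _ hgwf
  have hrender : pvRender ((pvGroups txt.toList).map pvTokOf) = txt.toList := by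
    rw [pvRender_tokOf _ hgok, pvJoin_eq_flatten, pvFlatten_groups]
  have hruns : (if PySem.Str.isIn "\n" txt = true
        then (txt.toList.foldl pvStepA (false, [])).2 else [])
      = pvRunsOf ((pvGroups txt.toList).map pvTokOf) := by
    by_cases hin : PySem.Str.isIn "\n" txt = true
    · rw [if_pos hin, (pvFoldA txt.toList).1 [], List.nil_append, pvRM_groups]
    · rw [if_neg hin]
      have hno : '\n' ∉ txt.toList := by
        rw [Bool.not_eq_true] at hin
        have h2 := (PySem.Chars.isIn_eq_false_iff "\n".toList txt.toList).mp hin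
        intro hmem
        exact h2 ((List.singleton_infix_iff '\n' txt.toList).mpr hmem)
      exact (pvNoNl_runsOf _ hwf (by rwa [hrender])).symm
  have hLmem : ∀ x : Int, x ∈ PySem.List.sorted
        (PySem.Set.ofList (pvRunsOf ((pvGroups txt.toList).map pvTokOf))) (fun x => x) true
      ↔ x ∈ pvRunsOf ((pvGroups txt.toList).map pvTokOf) := by
    intro x
    rw [(PySem.List.sorted_perm _ _ _).mem_iff, PySem.Set.mem_ofList]
  have hnodupL := ((PySem.List.sorted_perm
      (PySem.Set.ofList (pvRunsOf ((pvGroups txt.toList).map pvTokOf))) (fun x => x) true).nodup_iff).mpr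
    (PySem.Set.nodup_ofList _)
  have hpwge := PySem.List.sorted_pairwise_rev
    (PySem.Set.ofList (pvRunsOf ((pvGroups txt.toList).map pvTokOf))) (fun x : Int => x)
  have hpwgt : (PySem.List.sorted
      (PySem.Set.ofList (pvRunsOf ((pvGroups txt.toList).map pvTokOf))) (fun x => x) true).Pairwise (· > ·) := by
    have hand := List.Pairwise.and hpwge hnodupL
    exact hand.imp (fun {a b} h => by
      rcases h with ⟨h1, h2⟩
      omega)
  have hA : (pvLoopA (PySem.List.sorted
        (PySem.Set.ofList (pvRunsOf ((pvGroups txt.toList).map pvTokOf))) (fun x => x) true) txt).toList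
      = pvRender (((pvGroups txt.toList).map pvTokOf).filter pvKeep) := by
    have hmain := pvLoopAL_render _ _ hwf hpwgt
      (fun n hn => (hLmem _).mpr (pvMem_runsOf _ n hn))
      (fun i hi => pvRunsOf_pos _ hwf i ((hLmem i).mp hi))
    rw [hrender] at hmain
    rw [pvLoopA_toList]
    exact hmain
  have hB : PySem.Chars.join []
        ((pvGroups txt.toList).foldl
          (fun (parts : List (List Char)) run =>
            if ¬ run.head? = some '\n' ∨ run.length = 1 then parts ++ [run] else parts) [])
      = pvRender (((pvGroups txt.toList).map pvTokOf).filter pvKeep) := by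
    rw [PySem.List.foldl_append_ite_eq_filter
      (fun run : List Char => ¬ run.head? = some '\n' ∨ run.length = 1), List.nil_append]
    rw [pvFilter_tokOf _ hgok]
    rw [pvRender_tokOf _ (fun g hg => hgok g (List.mem_of_mem_filter hg))]
  have hout : pvLoopA (PySem.List.sorted
        (PySem.Set.ofList (pvRunsOf ((pvGroups txt.toList).map pvTokOf))) (fun x => x) true) txt
      = String.ofList (PySem.Chars.join []
          ((pvGroups txt.toList).foldl
            (fun (parts : List (List Char)) run =>
              if ¬ run.head? = some '\n' ∨ run.length = 1 then parts ++ [run] else parts) [])) := by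
    have h1 : (pvLoopA (PySem.List.sorted
          (PySem.Set.ofList (pvRunsOf ((pvGroups txt.toList).map pvTokOf))) (fun x => x) true) txt).toList
        = (String.ofList (PySem.Chars.join []
          ((pvGroups txt.toList).foldl
            (fun (parts : List (List Char)) run =>
              if ¬ run.head? = some '\n' ∨ run.length = 1 then parts ++ [run] else parts) []))).toList := by
      rw [hA]
      simp only [String.toList_ofList]
      rw [hB]
    have h2 := congrArg String.ofList h1
    simpa using h2
  simp only [format_spell_text, format_spell_text_alt]
  rw [hruns, hout]
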